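-- pv_equiv track=rewrite | github.com/Stefan/orka-ppm | backend/services/po_breakdown_compliance_service.py | _calculate_date_range
-- ===== SOURCE A (Python) =====
-- from typing import Dict, List, Any, Optional, BinaryIO
--
-- def _calculate_date_range(audit_data: Dict[str, Any]) -> Dict[str, Optional[str]]:
--     """Calculate date range of audit data."""
--     versions = audit_data.get('versions', [])
--     if not versions:
--         return {'start': None, 'end': None}
--
--     dates = [v.get('changed_at') for v in versions if v.get('changed_at')]
--     if not dates:
--         return {'start': None, 'end': None}
--
--     return {
--         'start': min(dates),
--         'end': max(dates)
--     }
-- ===== SOURCE B (Python) =====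
-- def _calculate_date_range(audit_data):
--     """Calculate date range of audit data."""
--     start = None
--     end = None
--     for v in audit_data.get('versions', []):
--         d = v.get('changed_at')
--         if not d:
--             continue
--         if start is None:
--             start = d
--             end = d
--         else:
--             if d < start:
--                 start = d
--             if d > end:
--                 end = d
--     return {'start': start, 'end': end}
-- ===== Notes on version B (the rewrite author's own statement) =====
-- stated objective: simpler
-- what changed: Replaces the comprehension plus separate min() and max() traversals (three passes and an intermediate list) with a single loop maintaining running start/end extremes; the empty cases fall out of the None initialisation instead of two early returns.
import Mathlib
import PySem

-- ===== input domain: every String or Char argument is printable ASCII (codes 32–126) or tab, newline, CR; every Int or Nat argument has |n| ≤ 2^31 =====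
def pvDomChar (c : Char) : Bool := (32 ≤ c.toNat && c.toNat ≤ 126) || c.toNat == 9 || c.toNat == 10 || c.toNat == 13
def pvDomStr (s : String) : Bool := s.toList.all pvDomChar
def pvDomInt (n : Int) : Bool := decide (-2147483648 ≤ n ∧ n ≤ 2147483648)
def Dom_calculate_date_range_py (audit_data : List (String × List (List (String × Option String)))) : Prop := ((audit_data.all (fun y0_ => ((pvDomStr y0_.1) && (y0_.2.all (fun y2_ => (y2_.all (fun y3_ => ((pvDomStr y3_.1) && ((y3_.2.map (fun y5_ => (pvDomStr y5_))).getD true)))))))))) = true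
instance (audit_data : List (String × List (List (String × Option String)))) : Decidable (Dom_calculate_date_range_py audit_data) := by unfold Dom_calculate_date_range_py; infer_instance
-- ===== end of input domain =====

-- ===== PORT A =====
-- One honest line: B replaces the comprehension + min() + max() (three passes and an
-- intermediate list) with a single loop keeping running start/end extremes (simpler).

-- dates = [v.get('changed_at') for v in versions if v.get('changed_at')]
-- (None and "" are falsy, so only nonempty strings are kept)
def pvDatesA (versions : List (List (String × Option String))) : List String :=
  versions.filterMap (fun v =>
    match (PySem.Dict.mk v).get? "changed_at" with
    | some (some s) => if s = "" then none else some s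
    | _ => none)

def calculate_date_range_py (audit_data : List (String × List (List (String × Option String)))) : List (String × Option String) :=
  let versions := (PySem.Dict.mk audit_data).getD "versions" []
  if versions = [] then [("start", none), ("end", none)]
  else
    let dates := pvDatesA versions
    if dates = [] then [("start", none), ("end", none)]
    else [("start", PySem.List.min? dates (fun x => x)),
          ("end", PySem.List.max? dates (fun x => x))]

-- ===== PORT B =====
-- loop body of Source B: skip falsy changed_at; first date sets both; later dates update extremes
def pvStepB (acc : Option String × Option String) (v : List (String × Option String)) : Option String × Option String :=
  match (PySem.Dict.mk v).get? "changed_at" with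
  | some (some d) =>
      if d = "" then acc
      else
        match acc with
        | (none, _) => (some d, some d)
        | (some s, some e) => (if d < s then some d else some s, if e < d then some d else some e)
        | (some s, none) => (some s, some d)   -- unreachable: start set implies end set
  | _ => acc

def calculate_date_range_py_alt (audit_data : List (String × List (List (String × Option String)))) : List (String × Option String) :=
  let r := ((PySem.Dict.mk audit_data).getD "versions" []).foldl pvStepB (none, none)
  [("start", r.1), ("end", r.2)]

-- ===== PRECONDITION & SPEC =====
def Spec_calculate_date_range_py (audit_data : List (String × List (List (String × Option String)))) (out : List (String × Option String)) : Prop := out = calculate_date_range_py_alt audit_data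
instance (audit_data : List (String × List (List (String × Option String)))) (out : List (String × Option String)) : Decidable (Spec_calculate_date_range_py audit_data out) := by unfold Spec_calculate_date_range_py; infer_instance

-- ===== CLAIM (what is proved, stated in full; the proofs are below) =====
def Claim_equal_calculate_date_range_py : Prop := ∀ (audit_data : List (String × List (List (String × Option String)))), Dom_calculate_date_range_py audit_data → Spec_calculate_date_range_py audit_data (calculate_date_range_py audit_data)

-- ===== LEMMAS AND PROOFS =====

theorem pv_if_lt_min (s d : String) : (if d < s then d else s) = min s d := by
  by_cases h : d < s
  · rw [if_pos h, min_def, if_neg (not_le.mpr h)]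
  · rw [if_neg h, min_def, if_pos (not_lt.mp h)]

theorem pv_if_lt_max (e d : String) : (if e < d then d else e) = max e d := by
  by_cases h : e < d
  · rw [if_pos h, max_def, if_pos (le_of_lt h)]
  · rw [if_neg h, max_def]
    rcases eq_or_lt_of_le (not_lt.mp h) with h2 | h2
    · subst h2; simp
    · rw [if_neg (not_le.mpr h2)]

theorem pv_some_if_min (s d : String) :
    (if d < s then some d else some s) = some (min s d) := by
  rw [← pv_if_lt_min]; split <;> rfl

theorem pv_some_if_max (e d : String) :
    (if e < d then some d else some e) = some (max e d) := by
  rw [← pv_if_lt_max]; split <;> rfl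

theorem pvRun_some (vs : List (List (String × Option String))) :
    ∀ s e : String, vs.foldl pvStepB (some s, some e) =
      (some ((pvDatesA vs).foldl min s), some ((pvDatesA vs).foldl max e)) := by
  induction vs with
  | nil => intro s e; simp [pvDatesA]
  | cons v vs ih =>
    intro s e
    cases hv : (PySem.Dict.mk v).get? "changed_at" with
    | none => simp [List.foldl, pvStepB, hv, pvDatesA, List.filterMap_cons, ih]
    | some o =>
      cases o with
      | none => simp [List.foldl, pvStepB, hv, pvDatesA, List.filterMap_cons, ih]
      | some d =>
        by_cases hd : d = ""
        · simp [List.foldl, pvStepB, hv, hd, pvDatesA, List.filterMap_cons, ih]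
        · simp only [List.foldl, pvStepB, hv, if_neg hd, pv_some_if_min, pv_some_if_max,
            pvDatesA, List.filterMap_cons, ih]

theorem pvRun_none (vs : List (List (String × Option String))) :
    vs.foldl pvStepB (none, none) =
      (PySem.List.min? (pvDatesA vs) (fun x => x), PySem.List.max? (pvDatesA vs) (fun x => x)) := by
  induction vs with
  | nil => simp [pvDatesA, PySem.List.min?, PySem.List.max?]
  | cons v vs ih =>
    cases hv : (PySem.Dict.mk v).get? "changed_at" with
    | none =>
      have hc : pvDatesA (v :: vs) = pvDatesA vs := by simp [pvDatesA, List.filterMap_cons, hv]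
      rw [List.foldl_cons, show pvStepB (none, none) v = (none, none) by simp [pvStepB, hv], hc]
      exact ih
    | some o =>
      cases o with
      | none =>
        have hc : pvDatesA (v :: vs) = pvDatesA vs := by simp [pvDatesA, List.filterMap_cons, hv]
        rw [List.foldl_cons, show pvStepB (none, none) v = (none, none) by simp [pvStepB, hv], hc]
        exact ih
      | some d =>
        by_cases hd : d = ""
        · have hc : pvDatesA (v :: vs) = pvDatesA vs := by
            simp [pvDatesA, List.filterMap_cons, hv, hd]
          rw [List.foldl_cons, show pvStepB (none, none) v = (none, none) by simp [pvStepB, hv, hd], hc]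
          exact ih
        · have hc : pvDatesA (v :: vs) = d :: pvDatesA vs := by
            simp [pvDatesA, List.filterMap_cons, hv, hd]
          rw [hc, PySem.List.min?_id_cons, PySem.List.max?_id_cons]
          simp only [List.foldl, pvStepB, hv, if_neg hd]
          exact pvRun_some vs d d

-- ===== VERDICT (by name: the statement is the Claim_ definition above) =====
theorem calculate_date_range_py_spec : Claim_equal_calculate_date_range_py := by
  intro audit_data _
  unfold Spec_calculate_date_range_py calculate_date_range_py calculate_date_range_py_alt
  simp only [pvRun_none]
  by_cases h1 : (PySem.Dict.mk audit_data).getD "versions" [] = []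
  · simp [h1, pvDatesA, PySem.List.min?, PySem.List.max?]
  · rw [if_neg h1]
    by_cases h2 : pvDatesA ((PySem.Dict.mk audit_data).getD "versions" []) = []
    · simp [h2, PySem.List.min?, PySem.List.max?]
    · rw [if_neg h2]
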